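-- pv_equiv track=rewrite | github.com/kkdub/skill-scan | tests/unit/test_newline_parity.py | _to_mixed
-- ===== SOURCE A (Python) =====
-- def _to_mixed(text: str) -> str:
--     """Alternate CRLF and CR per line break."""
--     lines = text.split("\n")
--     parts: list[str] = []
--     for i, line in enumerate(lines[:-1]):
--         parts.append(line)
--         parts.append("\r\n" if i % 2 == 0 else "\r")
--     if lines:
--         parts.append(lines[-1])
--     return "".join(parts)
-- ===== SOURCE B (Python) =====
-- def _to_mixed(text: str) -> str:
--     """Alternate CRLF and CR per line break, char-by-char with a newline counter."""
--     out = []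
--     seen = 0
--     for ch in text:
--         if ch == "\n":
--             out.append("\r\n" if seen % 2 == 0 else "\r")
--             seen += 1
--         else:
--             out.append(ch)
--     return "".join(out)
-- ===== Notes on version B (the rewrite author's own statement) =====
-- stated objective: alternative
-- what changed: B never splits the text into lines: it makes one character-level pass with a running newline counter, emitting CRLF/CR by counter parity, instead of building the split list, slicing off the last line, and interleaving separators by enumerate index.
import Mathlib
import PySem

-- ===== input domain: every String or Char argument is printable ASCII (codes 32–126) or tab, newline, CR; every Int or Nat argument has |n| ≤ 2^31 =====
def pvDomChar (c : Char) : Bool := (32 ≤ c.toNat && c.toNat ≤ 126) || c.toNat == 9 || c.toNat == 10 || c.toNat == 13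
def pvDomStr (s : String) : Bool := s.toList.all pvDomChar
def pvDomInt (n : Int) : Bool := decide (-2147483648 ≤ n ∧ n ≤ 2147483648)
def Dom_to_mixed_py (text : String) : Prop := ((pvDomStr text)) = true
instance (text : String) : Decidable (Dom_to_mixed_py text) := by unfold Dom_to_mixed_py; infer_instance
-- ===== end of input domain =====

-- B makes a single character-level pass with a running newline counter instead of
-- splitting into lines and interleaving separators by index (objective: alternative).

-- ===== PORT A =====
-- literal port of A: split on "\n", interleave lines[:-1] with CRLF/CR by index parity, append last line, join
def to_mixed_py (text : String) : String :=
  -- text.split("\n"): sep is non-empty so Str.split? is never none; getD is unreachable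
  let lines : List String := (PySem.Str.split? text "\n").getD []
  let parts : List String :=
    (PySem.List.enumerate (PySem.List.slice lines none (some (-1)))).foldl
      (fun acc (p : Int × String) =>
        (acc ++ [p.2]) ++ [if PySem.Int.mod p.1 2 == 0 then "\r\n" else "\r"]) []
  let parts : List String :=
    if lines.isEmpty then parts
    else parts ++ [(PySem.List.pyGet? lines (-1)).getD ""]  -- lines[-1]; lines is never empty
  PySem.Str.join "" parts

-- ===== PORT B =====
-- B's loop: for each char, emit it unless it is '\n', where CRLF/CR is emitted by counter parity
def altGo : List Char → Nat → List Char
  | [], _ => []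
  | c :: cs, k =>
      if c = '\n' then (if k % 2 == 0 then ['\r', '\n'] else ['\r']) ++ altGo cs (k + 1)
      else c :: altGo cs k

def to_mixed_py_alt (text : String) : String :=
  String.ofList (altGo text.toList 0)

-- ===== PRECONDITION & SPEC =====
def Spec_to_mixed_py (text : String) (out : String) : Prop := out = to_mixed_py_alt text
instance (text : String) (out : String) : Decidable (Spec_to_mixed_py text out) := by unfold Spec_to_mixed_py; infer_instance

-- ===== CLAIM (what is proved, stated in full; the proofs are below) =====
def Claim_equal_to_mixed_py : Prop := ∀ (text : String), Dom_to_mixed_py text → Spec_to_mixed_py text (to_mixed_py text)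

-- ===== LEMMAS AND PROOFS =====

-- the separator A/B place after the k-th newline
def sepk (k : Nat) : List Char := if k % 2 == 0 then ['\r', '\n'] else ['\r']

-- prepend p to the first piece
def headPre (p : List Char) : List (List Char) → List (List Char)
  | [] => [p]
  | h :: t => (p ++ h) :: t

-- clean structural recursion computing split on '\n'
def splitRec : List Char → List (List Char)
  | [] => [[]]
  | c :: cs => if c = '\n' then [] :: splitRec cs else headPre [c] (splitRec cs)

-- pieces interleaved with sepk k, sepk (k+1), …
def joinInter (k : Nat) : List (List Char) → List Char
  | [] => []
  | [l] => l
  | l :: r :: t => l ++ sepk k ++ joinInter (k + 1) (r :: t)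

theorem splitRec_ne_nil (cs : List Char) : splitRec cs ≠ [] := by
  cases cs with
  | nil => simp [splitRec]
  | cons c cs =>
      simp only [splitRec]
      split
      · simp
      · cases h : splitRec cs <;> simp [headPre]

theorem headPre_nil (r : List (List Char)) (hr : r ≠ []) : headPre [] r = r := by
  cases r with
  | nil => exact absurd rfl hr
  | cons h t => simp [headPre]

theorem headPre_headPre (a b : List Char) (r : List (List Char)) (hr : r ≠ []) :
    headPre a (headPre b r) = headPre (a ++ b) r := by
  cases r with
  | nil => exact absurd rfl hr
  | cons h t => simp [headPre]

theorem go_eq_splitRec (l : List Char) :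
    ∀ (fuel : Nat) (cur : List Char) (acc : List (List Char)), l.length < fuel →
      PySem.Chars.splitOn.go ['\n'] fuel l cur acc = acc.reverse ++ headPre cur.reverse (splitRec l) := by
  induction l with
  | nil =>
      intro fuel cur acc hf
      obtain ⟨fuel, rfl⟩ : ∃ f, fuel = f + 1 := ⟨fuel - 1, by omega⟩
      rw [PySem.Chars.splitOn.go]
      · simp [splitRec, headPre]
      · omega
  | cons c rest ih =>
      intro fuel cur acc hf
      obtain ⟨fuel, rfl⟩ : ∃ f, fuel = f + 1 := ⟨fuel - 1, by omega⟩
      rw [PySem.Chars.splitOn.go]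
      by_cases h : c = '\n'
      · subst h
        rw [if_pos (by simp [List.isPrefixOf])]
        simp only [List.length_singleton, List.drop_succ_cons, List.drop_zero]
        rw [ih fuel [] (cur.reverse :: acc) (by simp at hf; omega)]
        simp only [List.reverse_nil]
        rw [headPre_nil _ (splitRec_ne_nil rest)]
        rw [show splitRec ('\n' :: rest) = [] :: splitRec rest from by simp [splitRec]]
        simp [headPre]
      · rw [if_neg (by simp [List.isPrefixOf, Ne.symm h])]
        rw [ih fuel (c :: cur) acc (by simp at hf; omega)]
        rw [show splitRec (c :: rest) = headPre [c] (splitRec rest) from by simp [splitRec, h]]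
        rw [headPre_headPre _ _ _ (splitRec_ne_nil rest)]
        simp

theorem splitOn_eq_splitRec (cs : List Char) :
    PySem.Chars.splitOn cs ['\n'] = splitRec cs := by
  show PySem.Chars.splitOn.go ['\n'] (cs.length + 1) cs [] [] = _
  rw [go_eq_splitRec cs (cs.length + 1) [] [] (by omega)]
  simp [headPre_nil _ (splitRec_ne_nil cs)]

theorem joinInter_headPre (c : Char) (k : Nat) (r : List (List Char)) (hr : r ≠ []) :
    joinInter k (headPre [c] r) = c :: joinInter k r := by
  cases r with
  | nil => exact absurd rfl hr
  | cons h t => cases t <;> simp [headPre, joinInter]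

-- B computes the interleaving of the split pieces
theorem altGo_eq_joinInter (cs : List Char) :
    ∀ (k : Nat), altGo cs k = joinInter k (splitRec cs) := by
  induction cs with
  | nil => intro k; simp [altGo, splitRec, joinInter]
  | cons c rest ih =>
      intro k
      by_cases h : c = '\n'
      · subst h
        simp only [altGo, splitRec]
        rw [ih (k + 1)]
        cases hr : splitRec rest with
        | nil => exact absurd hr (splitRec_ne_nil rest)
        | cons a t => simp [joinInter, sepk]
      · simp only [altGo, if_neg h, splitRec]
        rw [ih k, joinInter_headPre c k _ (splitRec_ne_nil rest)]

theorem sepI_eq_sepk (k : Nat) :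
    (if PySem.Int.mod (k : Int) 2 == 0 then ['\r', '\n'] else ['\r']) = sepk k := by
  have h : PySem.Int.mod (k : Int) 2 = ((k % 2 : Nat) : Int) := by
    show Int.fmod _ _ = _
    rw [Int.fmod_eq_emod]
    omega
  rw [sepk, h]
  rcases Nat.mod_two_eq_zero_or_one k with h2 | h2 <;> simp [h2]

-- A's interleaving of lines[:-1] with separators, plus the last line, is joinInter
theorem flatMap_enum_eq_joinInter (t : List (List Char)) :
    ∀ (h : List Char) (k : Nat),
      ((PySem.List.enumerate (h :: t).dropLast (k : Int)).flatMap
        (fun p : Int × List Char =>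
          p.2 ++ (if PySem.Int.mod p.1 2 == 0 then ['\r', '\n'] else ['\r'])))
        ++ (h :: t).getLast (by simp) = joinInter k (h :: t) := by
  induction t with
  | nil => intro h k; simp [joinInter]
  | cons r t2 ih =>
      intro h k
      have e1 : (h :: r :: t2).dropLast = h :: (r :: t2).dropLast := by simp
      rw [e1]
      simp only [PySem.List.enumerate, List.flatMap_cons]
      have e2 : ((k : Int) + 1) = ((k + 1 : Nat) : Int) := by push_cast; ring
      rw [e2]
      have e3 : (h :: r :: t2).getLast (by simp) = (r :: t2).getLast (by simp) := by
        simp [List.getLast_cons]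
      rw [e3, List.append_assoc, ih r (k + 1), sepI_eq_sepk]
      simp [joinInter]

theorem enumerate_map {α β : Type} (f : α → β) (xs : List α) :
    ∀ (k : Int), PySem.List.enumerate (xs.map f) k =
      (PySem.List.enumerate xs k).map (fun p => (p.1, f p.2)) := by
  induction xs with
  | nil => intro k; simp [PySem.List.enumerate]
  | cons x t ih => intro k; simp [PySem.List.enumerate, ih]

theorem join_empty_sep (parts : List (List Char)) :
    PySem.Chars.join [] parts = parts.flatten := by
  simp [PySem.Chars.join, List.intercalate]
  induction parts with
  | nil => simp
  | cons h t ih => cases t <;> simp_all [List.intersperse]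

theorem pyGet_neg_one {α : Type} (x : α) (xs : List α) :
    PySem.List.pyGet? (x :: xs) (-1) = some ((x :: xs).getLast (by simp)) := by
  rw [List.getLast_eq_getElem]
  simp [PySem.List.pyGet?, PySem.List.pyIdx?]
  rfl

theorem slice_dropLast {α : Type} (xs : List α) :
    PySem.List.slice xs none (some (-1)) = xs.dropLast := by
  simp [PySem.List.slice, List.dropLast_eq_take]

theorem parts_chars (e : List (Int × List Char)) :
    (List.map String.toList ((e.map (fun p => (p.1, String.ofList p.2))).flatMap
        (fun p : Int × String => [p.2, if PySem.Int.mod p.1 2 == 0 then "\r\n" else "\r"]))).flatten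
      = e.flatMap (fun p : Int × List Char =>
          p.2 ++ (if PySem.Int.mod p.1 2 == 0 then ['\r', '\n'] else ['\r'])) := by
  induction e with
  | nil => simp
  | cons p e ih =>
      simp only [List.map_cons, List.flatMap_cons, List.map_append, List.flatten_append, ih]
      split <;> simp

-- ===== VERDICT (by name: the statement is the Claim_ definition above) =====
theorem to_mixed_py_spec : Claim_equal_to_mixed_py := by
  intro text _
  unfold Spec_to_mixed_py to_mixed_py to_mixed_py_alt
  have hsplit : PySem.Str.split? text "\n" =
      some ((splitRec text.toList).map String.ofList) := by
    simp [PySem.Str.split?, PySem.Chars.split?, splitOn_eq_splitRec]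
  rw [hsplit]
  simp only [Option.getD_some]
  cases hls : splitRec text.toList with
  | nil => exact absurd hls (splitRec_ne_nil text.toList)
  | cons h t =>
      rw [altGo_eq_joinInter text.toList 0, hls]
      simp only [List.map_cons, List.isEmpty_cons, Bool.false_eq_true, if_false, slice_dropLast]
      simp only [List.append_assoc, List.singleton_append]
      rw [PySem.List.foldl_append_eq_flatMap
            (fun p : Int × String => [p.2, if PySem.Int.mod p.1 2 == 0 then "\r\n" else "\r"]),
          List.nil_append]
      have hget : PySem.List.pyGet? (String.ofList h :: t.map String.ofList) (-1) =
          some (String.ofList ((h :: t).getLast (by simp))) := by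
        rw [pyGet_neg_one]
        congr 1
        cases t with
        | nil => simp
        | cons r t2 =>
            exact List.getLast_map (f := String.ofList) (l := h :: r :: t2) (by simp)
      rw [hget]
      simp only [Option.getD_some]
      have hmapdl : (String.ofList h :: t.map String.ofList).dropLast
          = ((h :: t).dropLast).map String.ofList := by
        rw [← List.map_cons, List.map_dropLast]
      rw [hmapdl, enumerate_map]
      rw [PySem.Str.join]
      congr 1
      rw [show ("" : String).toList = [] from rfl, join_empty_sep]
      rw [List.map_append, List.flatten_append, parts_chars]
      rw [← flatMap_enum_eq_joinInter t h 0]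
      simp
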